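-- pv_equiv track=rewrite | github.com/TdotA/Python_for_CS1 | Exam_2019/fence.py | is_limited
-- ===== SOURCE A (Python) =====
-- def is_limited(s, c):
--     count= {}
--     for x in s:
--         if not x in count:
--             count[x] = 1
--         else:
--             count[x] = count[x] + 1
--     for color, limit in c:
--         if count.get(color, 0) > limit:
--             return False
--     return True
-- ===== SOURCE B (Python) =====
-- def is_limited(s, c):
--     # Budget approach: take the tightest limit per color, then spend budgets
--     # in a single pass over s, failing as soon as one is overdrawn.
--     budget = {}
--     for color, limit in c:
--         budget[color] = min(budget.get(color, limit), limit)
--     if any(v < 0 for v in budget.values()):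
--         return False  # a limit below zero can never be met (count >= 0)
--     for x in s:
--         if x in budget:
--             budget[x] -= 1
--             if budget[x] < 0:
--                 return False
--     return True
-- ===== Notes on version B (the rewrite author's own statement) =====
-- stated objective: alternative
-- what changed: Replaces count-everything-then-compare with a single-pass budget scheme: the tightest limit per color is precomputed, then one pass over s decrements budgets and fails as soon as one is overdrawn (never counting anything).
import Mathlib
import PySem

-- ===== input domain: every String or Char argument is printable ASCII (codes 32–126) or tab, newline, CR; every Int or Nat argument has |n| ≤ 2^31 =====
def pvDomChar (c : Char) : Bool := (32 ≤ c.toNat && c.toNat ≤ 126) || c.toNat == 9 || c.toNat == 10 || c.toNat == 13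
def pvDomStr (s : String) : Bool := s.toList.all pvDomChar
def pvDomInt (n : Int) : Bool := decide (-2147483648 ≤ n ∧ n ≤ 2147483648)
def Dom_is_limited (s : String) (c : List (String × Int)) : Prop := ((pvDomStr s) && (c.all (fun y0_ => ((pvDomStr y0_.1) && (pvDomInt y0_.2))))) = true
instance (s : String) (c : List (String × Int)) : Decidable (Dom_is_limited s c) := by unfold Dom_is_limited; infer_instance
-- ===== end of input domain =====

-- B replaces A's count-then-compare with a single-pass budget scheme (tightest limit per color, decremented while scanning s); equivalence of return values, alternative algorithm of the same cost.


-- ===== PORT A =====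
-- iterating over a Python str yields 1-character strings, so dict keys are String.ofList [x]
def is_limited_checkLoop (count : PySem.Dict String Int) : List (String × Int) → Bool
  | [] => true
  | (color, limit) :: rest =>
      if count.getD color 0 > limit then false else is_limited_checkLoop count rest

def is_limited (s : String) (c : List (String × Int)) : Bool :=
  let count := s.toList.foldl
    (fun d x =>
      if d.contains (String.ofList [x]) = false then d.insert (String.ofList [x]) 1
      else d.insert (String.ofList [x]) (d.getD (String.ofList [x]) 0 + 1))
    PySem.Dict.empty
  is_limited_checkLoop count c

-- ===== PORT B =====
-- the second loop of B: spend budgets over the characters of s, fail on overdraw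
def is_limited_spendLoop (budget : PySem.Dict String Int) : List Char → Bool
  | [] => true
  | x :: xs =>
      let k := String.ofList [x]
      if budget.contains k then
        let b' := budget.insert k (budget.getD k 0 - 1)
        if b'.getD k 0 < 0 then false else is_limited_spendLoop b' xs
      else is_limited_spendLoop budget xs

def is_limited_alt (s : String) (c : List (String × Int)) : Bool :=
  let budget := c.foldl (fun d p => d.insert p.1 (min (d.getD p.1 p.2) p.2)) PySem.Dict.empty
  if budget.values.any (fun v => v < 0) then false
  else is_limited_spendLoop budget s.toList

-- ===== PRECONDITION & SPEC =====
def Spec_is_limited (s : String) (c : List (String × Int)) (out : Bool) : Prop := out = is_limited_alt s c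
instance (s : String) (c : List (String × Int)) (out : Bool) : Decidable (Spec_is_limited s c out) := by unfold Spec_is_limited; infer_instance

-- ===== CLAIM (what is proved, stated in full; the proofs are below) =====
def Claim_equal_is_limited : Prop := ∀ (s : String) (c : List (String × Int)), Dom_is_limited s c → Spec_is_limited s c (is_limited s c)

-- ===== LEMMAS AND PROOFS =====

-- A's counting loop computes, for every key, the number of its occurrences among the 1-char strings of s
lemma is_limited_counter_aux (l : List Char) (d : PySem.Dict String Int) (color : String) :
    (l.foldl
      (fun d x =>
        if d.contains (String.ofList [x]) = false then d.insert (String.ofList [x]) 1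
        else d.insert (String.ofList [x]) (d.getD (String.ofList [x]) 0 + 1))
      d).getD color 0
    = d.getD color 0 + ((l.map (fun ch => String.ofList [ch])).count color : Int) := by
  have hstep : ∀ (d : PySem.Dict String Int) (k : String),
      (if d.contains k = false then d.insert k 1
       else d.insert k (d.getD k 0 + 1)) = d.insert k (d.getD k 0 + 1) := by
    intro d k
    by_cases h : d.contains k = false
    · simp [h, PySem.Dict.getD_of_not_contains d 0 h]
    · simp [h]
  induction l generalizing d with
  | nil => simp
  | cons x xs ih =>
    rw [List.foldl_cons, hstep, ih, PySem.Dict.getD_insert]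
    simp only [List.map_cons, List.count_cons]
    by_cases hc : color = String.ofList [x]
    · simp [hc]; ring
    · simp [hc, Ne.symm hc]

-- A's result as a proposition: every constraint is met by the occurrence count
lemma is_limited_eq_decide (s : String) (c : List (String × Int)) :
    is_limited s c
    = decide (∀ p ∈ c, ((s.toList.map (fun ch => String.ofList [ch])).count p.1 : Int) ≤ p.2) := by
  unfold is_limited
  have hcnt : ∀ color, (s.toList.foldl
      (fun d x =>
        if d.contains (String.ofList [x]) = false then d.insert (String.ofList [x]) 1
        else d.insert (String.ofList [x]) (d.getD (String.ofList [x]) 0 + 1))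
      PySem.Dict.empty).getD color 0
      = ((s.toList.map (fun ch => String.ofList [ch])).count color : Int) := by
    intro color
    rw [is_limited_counter_aux]
    simp [PySem.Dict.getD_empty]
  induction c with
  | nil => simp [is_limited_checkLoop]
  | cons p rest ih =>
    obtain ⟨color, limit⟩ := p
    simp only [is_limited_checkLoop, hcnt]
    by_cases h : (((s.toList.map (fun ch => String.ofList [ch])).count color : Int)) > limit
    · have h' : ¬ (((s.toList.map (fun ch => String.ofList [ch])).count color : Int) ≤ limit) := by omega
      simp [h, h']
    · have h' : ((s.toList.map (fun ch => String.ofList [ch])).count color : Int) ≤ limit := by omega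
      simp [h, ih, h']

-- B's spending loop succeeds iff every tracked color that occurs at all stays within its budget
lemma is_limited_spendLoop_iff (l : List Char) (d : PySem.Dict String Int) :
    is_limited_spendLoop d l = true
    ↔ ∀ k, d.contains k = true →
        (((l.map (fun ch => String.ofList [ch])).count k : Int) = 0 ∨
         ((l.map (fun ch => String.ofList [ch])).count k : Int) ≤ d.getD k 0) := by
  induction l generalizing d with
  | nil => simp [is_limited_spendLoop]
  | cons x xs ih =>
    simp only [is_limited_spendLoop]
    by_cases hc : d.contains (String.ofList [x]) = true
    · simp only [hc, if_true]
      rw [PySem.Dict.getD_insert_self]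
      by_cases hneg : d.getD (String.ofList [x]) 0 - 1 < 0
      · simp only [hneg, if_true]
        constructor
        · intro h; exact absurd h (by simp)
        · intro h
          rcases h (String.ofList [x]) hc with h1 | h1 <;>
            simp only [List.map_cons, List.count_cons_self] at h1 <;> omega
      · simp only [hneg, if_false, ih]
        constructor
        · intro h k hk
          have hk' : (d.insert (String.ofList [x]) (d.getD (String.ofList [x]) 0 - 1)).contains k = true := by
            rw [PySem.Dict.contains_insert]; simp [hk]
          have hx := h k hk'
          rw [PySem.Dict.getD_insert] at hx
          by_cases he : k = String.ofList [x]
          · subst he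
            rw [if_pos rfl] at hx
            simp only [List.map_cons, List.count_cons_self]
            push_cast at hx ⊢; omega
          · simp only [if_neg he] at hx
            have hcc : (List.map (fun ch => String.ofList [ch]) (x :: xs)).count k
                = (List.map (fun ch => String.ofList [ch]) xs).count k := by
              simp only [List.map_cons]; rw [List.count_cons_of_ne (Ne.symm he)]
            rw [hcc]; exact hx
        · intro h k hk
          rw [PySem.Dict.contains_insert] at hk
          have hk2 : d.contains k = true := by
            rcases (by simpa using hk) with h1 | h1
            · subst h1; exact hc
            · exact h1
          have hx := h k hk2
          rw [PySem.Dict.getD_insert]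
          by_cases he : k = String.ofList [x]
          · subst he
            simp only [List.map_cons, List.count_cons_self] at hx
            push_cast at hx ⊢; omega
          · simp only [if_neg he]
            have hcc : (List.map (fun ch => String.ofList [ch]) (x :: xs)).count k
                = (List.map (fun ch => String.ofList [ch]) xs).count k := by
              simp only [List.map_cons]; rw [List.count_cons_of_ne (Ne.symm he)]
            rw [hcc] at hx; exact hx
    · -- x not tracked: its occurrences affect no tracked key
      have hcf : d.contains (String.ofList [x]) = false := by
        cases h : d.contains (String.ofList [x])
        · rfl
        · exact absurd h hc
      simp only [hcf, Bool.false_eq_true, if_false, ih]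
      constructor
      · intro h k hk
        have hne : k ≠ String.ofList [x] := fun he => by rw [he] at hk; exact absurd hk hc
        have hcc : (List.map (fun ch => String.ofList [ch]) (x :: xs)).count k
            = (List.map (fun ch => String.ofList [ch]) xs).count k := by
          simp only [List.map_cons]; rw [List.count_cons_of_ne (Ne.symm hne)]
        rw [hcc]; exact h k hk
      · intro h k hk
        have hne : k ≠ String.ofList [x] := fun he => by rw [he] at hk; exact absurd hk hc
        have hcc : (List.map (fun ch => String.ofList [ch]) (x :: xs)).count k
            = (List.map (fun ch => String.ofList [ch]) xs).count k := by
          simp only [List.map_cons]; rw [List.count_cons_of_ne (Ne.symm hne)]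
        have hx := h k hk
        rw [hcc] at hx; exact hx

-- the min-fold: a tracked budget covers the count iff every constraint is met (cnt ≥ 0 feeds in)
lemma is_limited_budget_iff (cnt : String → Int) (_hcnt : ∀ k, 0 ≤ cnt k)
    (c : List (String × Int)) (d : PySem.Dict String Int) :
    (∀ k, (c.foldl (fun d p => d.insert p.1 (min (d.getD p.1 p.2) p.2)) d).contains k = true →
        cnt k ≤ (c.foldl (fun d p => d.insert p.1 (min (d.getD p.1 p.2) p.2)) d).getD k 0)
    ↔ (∀ k, d.contains k = true → cnt k ≤ d.getD k 0) ∧ (∀ p ∈ c, cnt p.1 ≤ p.2) := by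
  induction c generalizing d with
  | nil => simp
  | cons p rest ih =>
    obtain ⟨color, limit⟩ := p
    rw [List.foldl_cons, ih, List.forall_mem_cons]
    dsimp only
    have hgd : d.contains color = true → d.getD color limit = d.getD color 0 := by
      intro hck
      rw [PySem.Dict.getD_eq_get?_getD, PySem.Dict.getD_eq_get?_getD]
      rcases h : d.get? color with _ | v
      · rw [PySem.Dict.contains_eq_isSome_get?, h] at hck; simp at hck
      · rfl
    constructor
    · rintro ⟨hd, hrest⟩
      refine ⟨?_, ?_, hrest⟩
      · intro k hk
        by_cases he : k = color
        · subst he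
          have hx := hd k (by rw [PySem.Dict.contains_insert]; simp)
          rw [PySem.Dict.getD_insert_self, hgd hk] at hx
          exact le_trans hx (min_le_left _ _)
        · have hx := hd k (by rw [PySem.Dict.contains_insert]; simp [hk])
          rw [PySem.Dict.getD_insert, if_neg he] at hx
          exact hx
      · -- the head constraint is met
        have hx := hd color (by rw [PySem.Dict.contains_insert]; simp)
        rw [PySem.Dict.getD_insert_self] at hx
        exact le_trans hx (min_le_right _ _)
    · rintro ⟨hd, hc0, hrest⟩
      refine ⟨?_, hrest⟩
      intro k hk
      rw [PySem.Dict.contains_insert] at hk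
      rw [PySem.Dict.getD_insert]
      by_cases he : k = color
      · subst he
        rw [if_pos rfl]
        by_cases hck : d.contains k = true
        · exact le_min (by rw [hgd hck]; exact hd k hck) hc0
        · rw [PySem.Dict.getD_of_not_contains d limit (by simpa using hck), min_self]
          exact hc0
      · rw [if_neg he]
        rcases (by simpa using hk) with h1 | h1
        · exact absurd h1 he
        · exact hd k h1

-- the precheck over values, restated over keys
lemma is_limited_values_iff (d : PySem.Dict String Int) (hnd : d.keys.Nodup) :
    (d.values.any (fun v => v < 0) = false) ↔ ∀ k, d.contains k = true → 0 ≤ d.getD k 0 := by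
  rw [PySem.Dict.values_eq_map_keys d hnd 0]
  simp only [List.any_map, List.any_eq_false]
  constructor
  · intro h k hk
    have := h k (by rwa [← PySem.Dict.contains_iff_mem_keys])
    simp at this; omega
  · intro h v hv
    have := h v (by rw [PySem.Dict.contains_iff_mem_keys]; exact hv)
    simp; omega

-- ===== VERDICT (by name: the statement is the Claim_ definition above) =====
theorem is_limited_spec : Claim_equal_is_limited := by
  intro s c _
  unfold Spec_is_limited
  set cnt : String → Int := fun k => ((s.toList.map (fun ch => String.ofList [ch])).count k : Int) with hcntdef
  have hcnt0 : ∀ k, 0 ≤ cnt k := fun k => by positivity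
  rw [is_limited_eq_decide]
  unfold is_limited_alt
  set budget := c.foldl (fun d p => d.insert p.1 (min (d.getD p.1 p.2) p.2)) PySem.Dict.empty with hb
  have hnd : budget.keys.Nodup := by
    rw [hb]
    exact PySem.Dict.nodup_keys_foldl_insert_key c (fun p => p.1)
      (fun d p => min (d.getD p.1 p.2) p.2) PySem.Dict.empty (by simp [PySem.Dict.keys_empty])
  have hbud := is_limited_budget_iff cnt hcnt0 c PySem.Dict.empty
  simp only [PySem.Dict.contains_empty] at hbud
  -- goal: decide (…) = if budget.values.any … then false else spendLoop …
  by_cases hneg : budget.values.any (fun v => v < 0) = true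
  · simp only [hneg, if_true]
    -- some budget is negative: some constraint fails (count ≥ 0 > budget ≥ min limit)
    have : ¬ (∀ p ∈ c, cnt p.1 ≤ p.2) := by
      intro hall
      have hgood : ∀ k, budget.contains k = true → cnt k ≤ budget.getD k 0 := by
        rw [hb, hbud]; exact ⟨by simp, hall⟩
      have hpos : ∀ k, budget.contains k = true → 0 ≤ budget.getD k 0 := by
        intro k hk; exact le_trans (hcnt0 k) (hgood k hk)
      rw [← is_limited_values_iff budget hnd] at hpos
      rw [hpos] at hneg; exact absurd hneg (by simp)
    simpa using this
  · have hneg' : budget.values.any (fun v => v < 0) = false := by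
      cases h : budget.values.any (fun v => v < 0)
      · rfl
      · exact absurd h hneg
    simp only [hneg', Bool.false_eq_true, if_false]
    have hiff := is_limited_spendLoop_iff s.toList budget
    have h0 : ∀ k, budget.contains k = true → 0 ≤ budget.getD k 0 :=
      (is_limited_values_iff budget hnd).mp hneg'
    -- both sides are decided propositions; compare them
    cases hA : decide (∀ p ∈ c, cnt p.1 ≤ p.2) with
    | true =>
      have hall : ∀ p ∈ c, cnt p.1 ≤ p.2 := of_decide_eq_true hA
      have hgood : ∀ k, budget.contains k = true → cnt k ≤ budget.getD k 0 := by
        rw [hb, hbud]; exact ⟨by simp, hall⟩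
      have : is_limited_spendLoop budget s.toList = true := by
        rw [hiff]; intro k hk; exact Or.inr (hgood k hk)
      rw [this]
    | false =>
      have hnall : ¬ (∀ p ∈ c, cnt p.1 ≤ p.2) := of_decide_eq_false hA
      cases hS : is_limited_spendLoop budget s.toList with
      | false => rfl
      | true =>
        exfalso
        have hsp := (hiff.mp hS)
        have hgood : ∀ k, budget.contains k = true → cnt k ≤ budget.getD k 0 := by
          intro k hk
          rcases hsp k hk with h1 | h1
          · have hz : cnt k = 0 := h1
            rw [hz]; exact h0 k hk
          · exact h1
        rw [hb, hbud] at hgood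
        exact hnall hgood.2
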